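-- pv_equiv track=rewrite | github.com/annareithmeir/ProteinStructurePredictionWithMultitaskLearning | InputToMatrix.py | countStructures3
-- ===== SOURCE A (Python) =====
-- def countStructures3(sequence):
--     c=0
--     h=0
--     e=0
--     xy=0
--     for i in range(len(sequence)):
--         if(sequence[i]=='C'):
--             c+=1
--         elif(sequence[i]=='H'):
--             h+=1
--         elif(sequence[i]=='E'):
--             e+=1
--         elif(sequence[i]=='X' or sequence[i]=='Y'):
--             xy+=1
--         else:
--             raise ValueError('Unknown structure')
--
--     return c,h,e,xy
-- ===== SOURCE B (Python) =====
-- def countStructures3(sequence):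
--     # Sort, then run-length encode the sorted characters into a frequency dict.
--     s = sorted(sequence)
--     counts = {}
--     i = 0
--     n = len(s)
--     while i < n:
--         j = i
--         while j < n and s[j] == s[i]:
--             j += 1
--         counts[s[i]] = j - i
--         i = j
--     for k in counts:
--         if k not in ('C', 'H', 'E', 'X', 'Y'):
--             raise ValueError('Unknown structure')
--     return (counts.get('C', 0), counts.get('H', 0),
--             counts.get('E', 0), counts.get('X', 0) + counts.get('Y', 0))
-- ===== Notes on version B (the rewrite author's own statement) =====
-- stated objective: alternative
-- what changed: Replaces A's single indexed pass with four if/elif counters by sort-then-scan: sort the characters, run-length encode the sorted list into a frequency dict with a two-pointer while loop, validate the dict's keys, and return four lookups.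
import Mathlib
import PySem

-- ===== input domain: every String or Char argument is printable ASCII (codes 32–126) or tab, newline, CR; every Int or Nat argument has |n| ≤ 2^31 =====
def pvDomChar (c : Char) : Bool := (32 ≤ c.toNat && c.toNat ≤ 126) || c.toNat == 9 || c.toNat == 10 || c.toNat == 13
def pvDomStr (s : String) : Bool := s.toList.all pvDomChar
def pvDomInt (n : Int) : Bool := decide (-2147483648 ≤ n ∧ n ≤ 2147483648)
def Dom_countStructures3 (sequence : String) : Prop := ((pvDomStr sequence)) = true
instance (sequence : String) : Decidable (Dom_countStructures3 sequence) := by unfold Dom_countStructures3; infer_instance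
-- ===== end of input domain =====

-- B replaces A's indexed if/elif accumulator pass by sort + two-pointer run-length
-- encoding into a frequency dict, key validation, and four lookups (a different,
-- same-result algorithm). Pre_ excludes sequences with a character outside
-- {C,H,E,X,Y}, on which both programs raise ValueError('Unknown structure').


-- ===== PORT A =====
-- A's loop over range(len(sequence)) with four mutable counters; the 'else: raise'
-- branch is unreachable under Pre_ (no value; we stop, leaving the counters).
def countStructures3_go : List Char → Int → Int → Int → Int → Int × Int × Int × Int
  | [], c, h, e, xy => (c, h, e, xy)
  | ch :: t, c, h, e, xy =>
    if ch = 'C' then countStructures3_go t (c + 1) h e xy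
    else if ch = 'H' then countStructures3_go t c (h + 1) e xy
    else if ch = 'E' then countStructures3_go t c h (e + 1) xy
    else if ch = 'X' ∨ ch = 'Y' then countStructures3_go t c h e (xy + 1)
    else (c, h, e, xy)  -- raise ValueError('Unknown structure'): excluded by Pre_

def countStructures3 (sequence : String) : Int × Int × Int × Int :=
  countStructures3_go sequence.toList 0 0 0 0

-- ===== PORT B =====
-- Source B's outer while loop: at each head x the inner 'while s[j]==s[i]' advance of j
-- is the takeWhile/dropWhile split of the tail; counts[s[i]] = j - i = 1 + run length.
def countStructures3_rle : List Char → PySem.Dict Char Int → PySem.Dict Char Int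
  | [], d => d
  | x :: t, d =>
    countStructures3_rle (t.dropWhile (· == x))
      (d.insert x (1 + ((t.takeWhile (· == x)).length : Int)))
  termination_by l _ => l.length
  decreasing_by
    simp only [List.length_cons]
    exact Nat.lt_succ_of_le (List.length_dropWhile_le _ _)

-- Source B's key-validation loop raises exactly on inputs excluded by Pre_; the port skips it.
def countStructures3_alt (sequence : String) : Int × Int × Int × Int :=
  let s := PySem.List.sorted sequence.toList (fun c => c) false
  let d := countStructures3_rle s PySem.Dict.empty
  (d.getD 'C' 0, d.getD 'H' 0, d.getD 'E' 0, d.getD 'X' 0 + d.getD 'Y' 0)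

-- ===== PRECONDITION & SPEC =====
-- Pre_ excludes inputs containing a character outside {C,H,E,X,Y}: there both A and B raise ValueError.
def Pre_countStructures3 (sequence : String) : Prop :=
  (sequence.toList.all (fun ch => ch == 'C' || ch == 'H' || ch == 'E' || ch == 'X' || ch == 'Y')) = true
instance (sequence : String) : Decidable (Pre_countStructures3 sequence) := by
  unfold Pre_countStructures3; infer_instance

def pvWitness_countStructures3 : String := "CHEXY"

def Spec_countStructures3 (sequence : String) (out : Int × Int × Int × Int) : Prop := out = countStructures3_alt sequence
instance (sequence : String) (out : Int × Int × Int × Int) : Decidable (Spec_countStructures3 sequence out) := by unfold Spec_countStructures3; infer_instance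

-- ===== CLAIM (what is proved, stated in full; the proofs are below) =====
def Claim_equal_countStructures3 : Prop := ∀ (sequence : String), Dom_countStructures3 sequence → Pre_countStructures3 sequence → Spec_countStructures3 sequence (countStructures3 sequence)

-- ===== LEMMAS AND PROOFS =====

-- A's accumulator loop computes the four character counts (under Pre_'s alphabet).
theorem countStructures3_go_eq (l : List Char)
    (hl : ∀ ch ∈ l, ch = 'C' ∨ ch = 'H' ∨ ch = 'E' ∨ ch = 'X' ∨ ch = 'Y') :
    ∀ c h e xy, countStructures3_go l c h e xy =
      (c + l.count 'C', h + l.count 'H', e + l.count 'E',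
        xy + l.count 'X' + l.count 'Y') := by
  induction l with
  | nil => intro c h e xy; simp [countStructures3_go]
  | cons ch t ih =>
    intro c h e xy
    have hch := hl ch (List.mem_cons_self ..)
    have ht : ∀ x ∈ t, x = 'C' ∨ x = 'H' ∨ x = 'E' ∨ x = 'X' ∨ x = 'Y' :=
      fun x hx => hl x (List.mem_cons_of_mem _ hx)
    rcases hch with rfl | rfl | rfl | rfl | rfl <;>
      simp [countStructures3_go, ih ht] <;> ring_nf

-- On a sorted list, B's run-length pass builds the exact frequency table.
theorem countStructures3_rle_getD (s : List Char) (d : PySem.Dict Char Int)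
    (hs : s.Pairwise (· ≤ ·)) :
    ∀ ch : Char,
      (countStructures3_rle s d).getD ch 0 =
        if ch ∈ s then (s.count ch : Int) else d.getD ch 0 := by
  induction s, d using countStructures3_rle.induct with
  | case1 d => simp [countStructures3_rle]
  | case2 x t d ih =>
    intro ch
    have htk : ∀ y ∈ t.takeWhile (· == x), y = x := by
      intro y hy
      have := List.mem_takeWhile_imp hy
      simpa using this
    have hdr_sorted : (t.dropWhile (· == x)).Pairwise (· ≤ ·) :=
      List.Pairwise.sublist (List.dropWhile_sublist _) (List.pairwise_cons.mp hs).2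
    have hxle : ∀ y ∈ t, x ≤ y := (List.pairwise_cons.mp hs).1
    have hxdr : x ∉ t.dropWhile (· == x) := by
      intro hmem
      rcases hd : t.dropWhile (· == x) with _ | ⟨y, r⟩
      · simp [hd] at hmem
      · have h2 : t.dropWhile (· == x) ≠ [] := by simp [hd]
        have h3 := List.head_dropWhile_not (· == x) h2
        have hyx : y ≠ x := by simpa [hd] using h3
        have hxy : x < y := lt_of_le_of_ne
          (hxle y ((List.dropWhile_sublist _).subset (by rw [hd]; exact List.mem_cons_self ..)))
          (Ne.symm hyx)
        rw [hd] at hmem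
        rcases List.mem_cons.mp hmem with rfl | hmem'
        · exact absurd rfl hyx
        · have hydr := hdr_sorted
          rw [hd] at hydr
          have hle : y ≤ x := (List.pairwise_cons.mp hydr).1 x hmem'
          exact absurd hxy (not_lt.mpr hle)
    have hsplitc : ∀ c : Char, (t.takeWhile (· == x)).count c
        + (t.dropWhile (· == x)).count c = t.count c := by
      intro c
      conv_rhs => rw [← List.takeWhile_append_dropWhile (p := (· == x)) (l := t)]
      rw [List.count_append]
    rw [countStructures3_rle, ih hdr_sorted ch, PySem.Dict.getD_insert]
    by_cases hcx : ch = x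
    · subst hcx
      rw [if_neg hxdr, if_pos rfl]
      have h1 : (t.takeWhile (· == ch)).count ch = (t.takeWhile (· == ch)).length :=
        List.count_eq_length.mpr (fun b hb => (htk b hb).symm)
      have h2 : (t.dropWhile (· == ch)).count ch = 0 :=
        List.count_eq_zero.mpr hxdr
      have hcnt : (ch :: t).count ch = (t.takeWhile (· == ch)).length + 1 := by
        have := hsplitc ch
        rw [List.count_cons_self]
        omega
      rw [if_pos (List.mem_cons_self ..), hcnt]
      push_cast; ring
    · have hchtk : ch ∉ t.takeWhile (· == x) := fun hm => hcx (htk ch hm)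
      have hcnt : (x :: t).count ch = (t.dropWhile (· == x)).count ch := by
        have h0 : (x :: t).count ch = t.count ch := by
          simp [Ne.symm hcx]
        have h1 : (t.takeWhile (· == x)).count ch = 0 :=
          List.count_eq_zero.mpr hchtk
        have := hsplitc ch
        omega
      have hmemiff : ch ∈ x :: t ↔ ch ∈ t.dropWhile (· == x) := by
        constructor
        · intro hm
          rcases List.mem_cons.mp hm with rfl | hm'
          · exact absurd rfl hcx
          · rw [← List.takeWhile_append_dropWhile (p := (· == x)) (l := t)] at hm'
            rcases List.mem_append.mp hm' with hm'' | hm''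
            · exact absurd (htk ch hm'') hcx
            · exact hm''
        · intro hm
          exact List.mem_cons_of_mem _ ((List.dropWhile_sublist _).subset hm)
      rw [if_neg hcx, hcnt]
      by_cases hm : ch ∈ t.dropWhile (· == x)
      · rw [if_pos hm, if_pos (hmemiff.mpr hm)]
      · rw [if_neg hm, if_neg (fun h => hm (hmemiff.mp h))]

-- B's result is the frequency of ch in the original list (sorted is a permutation).
theorem alt_getD (l : List Char) (ch : Char) :
    (countStructures3_rle (PySem.List.sorted l (fun c => c) false)
        PySem.Dict.empty).getD ch 0 = (l.count ch : Int) := by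
  set s := PySem.List.sorted l (fun c => c) false with hsdef
  have hperm : s.Perm l := PySem.List.sorted_perm l (fun c => c) false
  have hsort : s.Pairwise (· ≤ ·) := by
    have := PySem.List.sorted_pairwise l (fun c => c)
    simpa [hsdef] using this
  rw [countStructures3_rle_getD s PySem.Dict.empty hsort ch, hperm.count_eq]
  by_cases hm : ch ∈ s
  · rw [if_pos hm]
  · rw [if_neg hm, PySem.Dict.getD_empty,
      List.count_eq_zero.mpr (fun h => hm (hperm.mem_iff.mpr h))]
    simp

-- ===== VERDICT (by name: the statement is the Claim_ definition above) =====
theorem countStructures3_spec : Claim_equal_countStructures3 := by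
  intro s _ hpre
  unfold Spec_countStructures3 countStructures3 countStructures3_alt
  have hpre' : ∀ ch ∈ s.toList, ch = 'C' ∨ ch = 'H' ∨ ch = 'E' ∨ ch = 'X' ∨ ch = 'Y' := by
    intro ch hch
    have h2 := List.all_eq_true.mp hpre ch hch
    simp only [Bool.or_eq_true, beq_iff_eq] at h2
    tauto
  simp only [countStructures3_go_eq s.toList hpre', alt_getD]
  ring_nf
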